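-- pv_equiv track=rewrite | github.com/mpunkenhofer/aoc2020 | src/day14.py | addr_decoder
-- ===== SOURCE A (Python) =====
-- from itertools import product
--
-- def replace_floating(mask, positions, replacements):
--     if len(positions) != len(replacements):
--         raise RuntimeError('count of positions != replacements')
--
--     for i, p in enumerate(positions):
--         mask = mask[:p] + replacements[i] + mask[p+1:]
--
--     return mask
--
-- def addr_decoder(mask, addr, value):
--     addr = '{:036b}'.format(addr)
--     result = ''
--
--     for (mi, ai) in zip(mask, addr):
--         if mi == '1' or mi == 'X':
--             result += mi
--         else:
--             result += ai
--
--     floating = result.count('X')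
--     mem = {}
--
--     for f in product('10', repeat=floating):
--         addr = replace_floating(result, [i for i, ltr in enumerate(result) if ltr == 'X'], f)
--         mem[int('0b' + addr, 2)] = value
--
--     return mem
-- ===== SOURCE B (Python) =====
-- def addr_decoder(mask, addr, value):
--     bits = '{:036b}'.format(addr)
--     n = min(len(mask), 36)
--     base = 0
--     floating = []
--     for i, c in enumerate(mask[:n]):
--         p = n - 1 - i
--         if c == '1':
--             base += 2 ** p
--         elif c == 'X':
--             floating.append(p)
--         else:
--             base += int(bits[i]) * 2 ** p
--     addrs = [base]
--     for p in floating: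
--         bit = 2 ** p
--         addrs = [a2 for a in addrs for a2 in (a + bit, a)]
--     return {a: value for a in addrs}
-- ===== Notes on version B (the rewrite author's own statement) =====
-- stated objective: alternative
-- what changed: A overlays the mask on the formatted address string and, for every itertools.product('10', ...) tuple, rebuilds the whole string by slicing and reparses it with int(s, 2); B scans the mask once to compute an integer base address and the list of floating bit positions, then doubles a list of integer addresses once per floating bit -- no product, no string rebuilding, no reparsing.
import Mathlib
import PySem

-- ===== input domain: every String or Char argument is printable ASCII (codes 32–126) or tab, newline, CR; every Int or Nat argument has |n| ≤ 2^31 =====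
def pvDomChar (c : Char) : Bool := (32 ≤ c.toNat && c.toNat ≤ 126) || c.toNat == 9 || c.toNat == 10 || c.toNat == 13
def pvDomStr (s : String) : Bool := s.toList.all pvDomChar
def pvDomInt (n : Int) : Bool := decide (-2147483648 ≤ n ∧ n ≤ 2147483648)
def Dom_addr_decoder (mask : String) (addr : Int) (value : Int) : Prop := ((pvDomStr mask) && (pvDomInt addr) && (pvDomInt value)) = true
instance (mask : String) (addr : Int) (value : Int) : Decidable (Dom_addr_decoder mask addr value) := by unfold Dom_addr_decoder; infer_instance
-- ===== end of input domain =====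

-- B replaces A's overlay-string / product-of-strings / int(s,2)-reparsing pipeline by integer bit
-- arithmetic: one scan computing a base address and the floating bit positions, then doubling a
-- list of integer addresses per floating bit (objective: alternative).


-- ===== PORT A =====

-- port of replace_floating: mask = mask[:p] + replacements[i] + mask[p+1:] for each (i, p).
-- Python raises RuntimeError when the two lengths differ; that call never happens from
-- addr_decoder (positions are exactly the X-indices, replacements a tuple of the same length),
-- so the [] returned on that branch is never used.
def repStep (replacements : List Char) (acc : List Char) (ip : Int × Int) : List Char :=
  PySem.List.slice acc none (some ip.2) ++ [PySem.List.pyGetD replacements ip.1 ' ']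
    ++ PySem.List.slice acc (some (ip.2 + 1)) none

def replace_floating (mask : List Char) (positions : List Int) (replacements : List Char) : List Char :=
  if positions.length ≠ replacements.length then []
  else (PySem.List.enumerate positions).foldl (repStep replacements) mask

-- itertools.product('10', repeat=n), in CPython's order (first component varies slowest, '1' first)
def pyProduct10 : Nat → List (List Char)
  | 0 => [[]]
  | n + 1 => ['1', '0'].flatMap (fun c => (pyProduct10 n).map (c :: ·))

-- hand port of int('0b' + s, 2): exact when s is a nonempty string of '0'/'1' digits, which is
-- the only shape addr_decoder feeds it under Pre_; on any other shape Python raises ValueError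
-- (those inputs are outside Pre_).
def parseBin (u : List Char) : Int :=
  u.foldl (fun acc c => 2 * acc + (if c = '1' then 1 else 0)) 0

def addr_decoder (mask : String) (addr : Int) (value : Int) : List (Int × Int) :=
  -- addr = '{:036b}'.format(addr)  (zero-padded to width 36, sign first)
  let addrChars := PySem.Chars.zfill (PySem.Int.toBinChars addr) 36
  -- result = '' ; for (mi, ai) in zip(mask, addr): result += mi if mi in '1X' else ai
  let result := (mask.toList.zip addrChars).foldl
    (fun r mi => r ++ [if mi.1 = '1' ∨ mi.1 = 'X' then mi.1 else mi.2]) []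
  -- floating = result.count('X')
  let floating := PySem.List.count result 'X'
  -- for f in product('10', repeat=floating): mem[int('0b' + replace_floating(...), 2)] = value
  let mem := (pyProduct10 floating).foldl
    (fun (d : PySem.Dict Int Int) f =>
      d.insert
        (parseBin (replace_floating result
          (((PySem.List.enumerate result).filter (fun p => p.2 = 'X')).map (·.1)) f))
        value)
    PySem.Dict.empty
  mem.items

-- ===== PORT B =====

-- one step of B's scan over enumerate(mask[:n]): '1' sets bit n-1-i of base, 'X' records a
-- floating bit position, anything else adds int(bits[i]) * 2**p (int('-') = ValueError, outside Pre_)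
def altStep (n : Nat) (bits : List Char) (st : Int × List Nat) (ic : Int × Char) : Int × List Nat :=
  let p := n - 1 - ic.1.toNat
  if ic.2 = '1' then (st.1 + 2 ^ p, st.2)
  else if ic.2 = 'X' then (st.1, st.2 ++ [p])
  else (st.1 + (PySem.Int.ofChars? [PySem.List.pyGetD bits ic.1 ' ']).getD 0 * 2 ^ p, st.2)

-- addrs = [a2 for a in addrs for a2 in (a + bit, a)] with bit = 2 ** p
def expandStep (as : List Int) (p : Nat) : List Int :=
  as.flatMap (fun a => [a + 2 ^ p, a])

def addr_decoder_alt (mask : String) (addr : Int) (value : Int) : List (Int × Int) :=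
  -- bits = '{:036b}'.format(addr)
  let bits := PySem.Chars.zfill (PySem.Int.toBinChars addr) 36
  let n := min mask.toList.length 36
  let st := (PySem.List.enumerate (PySem.List.slice mask.toList none (some (n : Int)))).foldl
    (altStep n bits) (0, [])
  let addrs := st.2.foldl expandStep [st.1]
  (addrs.foldl (fun (d : PySem.Dict Int Int) a => d.insert a value) PySem.Dict.empty).items

-- ===== PRECONDITION & SPEC =====

-- Pre_ excludes exactly the inputs (inside Dom) on which Python A raises ValueError: the empty
-- mask (int('0b', 2)), and a negative address whose formatted '-' sign survives into int(..., 2)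
-- because the mask's first character is neither '1' nor 'X'.  B raises ValueError on the same
-- inputs except the empty mask.
def Pre_addr_decoder (mask : String) (addr : Int) (value : Int) : Prop :=
  mask ≠ "" ∧ (0 ≤ addr ∨ mask.toList.head? = some '1' ∨ mask.toList.head? = some 'X')
instance (mask : String) (addr : Int) (value : Int) : Decidable (Pre_addr_decoder mask addr value) := by
  unfold Pre_addr_decoder; infer_instance

def pvWitness_addr_decoder : String × Int × Int := ("X0", 3, 7)

def Spec_addr_decoder (mask : String) (addr : Int) (value : Int) (out : List (Int × Int)) : Prop :=
  out = addr_decoder_alt mask addr value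
instance (mask : String) (addr : Int) (value : Int) (out : List (Int × Int)) : Decidable (Spec_addr_decoder mask addr value out) := by
  unfold Spec_addr_decoder; infer_instance

-- ===== CLAIM (what is proved, stated in full; the proofs are below) =====
def Claim_equal_addr_decoder : Prop := ∀ (mask : String) (addr : Int) (value : Int), Dom_addr_decoder mask addr value → Pre_addr_decoder mask addr value → Spec_addr_decoder mask addr value (addr_decoder mask addr value)

-- ===== LEMMAS AND PROOFS =====

-- bit value of a mask/result character ('1' ↦ 1, everything else 0)
def cvb (c : Char) : Int := if c = '1' then 1 else 0
-- character of a bit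
def chb (b : Nat) : Char := if b = 1 then '1' else '0'
-- the w-bit binary expansion of a, MSB first
def bitsL (w a : Nat) : List Char := (List.range w).map (fun i => chb (a / 2 ^ (w - 1 - i) % 2))
-- the overlay string both programs work from (mask zipped with the formatted address chars)
def combineMask (cs bs : List Char) : List Char :=
  (cs.zip bs).map (fun p => if p.1 = '1' ∨ p.1 = 'X' then p.1 else p.2)
-- all decoded addresses of an overlay string, in the order A emits them
def core : List Char → List Int
  | [] => [0]
  | c :: t =>
    if c = 'X' then (core t).map (fun v => 2 ^ t.length + v) ++ core t
    else (core t).map (fun v => cvb c * 2 ^ t.length + v)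
def coreBase : List Char → Int
  | [] => 0
  | c :: t => (if c = 'X' then 0 else cvb c * 2 ^ t.length) + coreBase t
def coreFloat : List Char → List Nat
  | [] => []
  | c :: t => (if c = 'X' then [t.length] else []) ++ coreFloat t
-- replace the successive 'X's of s by the successive characters of f
def fill : List Char → List Char → List Char
  | [], _ => []
  | c :: t, f =>
    if c = 'X' then
      match f with
      | [] => c :: fill t []
      | r :: rf => r :: fill t rf
    else c :: fill t f
-- binary digits of n without padding, MSB first (the digits Nat.toDigits 2 produces)
def myDigits (n : Nat) : List Char :=
  if n < 2 then [Nat.digitChar n] else myDigits (n / 2) ++ [Nat.digitChar (n % 2)]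
decreasing_by exact Nat.div_lt_self (by omega) (by omega)

def xpos (s : List Char) : List Int :=
  ((PySem.List.enumerate s).filter (fun p => p.2 = 'X')).map (·.1)

theorem toDigitsCore_eq (f : Nat) : ∀ (n : Nat) (acc : List Char), 0 < f → n < 2 ^ f →
    Nat.toDigitsCore 2 f n acc = myDigits n ++ acc := by
  induction f with
  | zero => intro n acc h; omega
  | succ fuel ih =>
    intro n acc _ hn
    rw [Nat.toDigitsCore]
    by_cases h2 : n / 2 = 0
    · rw [if_pos h2, myDigits, if_pos (by omega)]
      have : n % 2 = n := by omega
      rw [this]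
      rfl
    · rw [if_neg h2]
      have hfuel : 0 < fuel := by
        rcases Nat.eq_zero_or_pos fuel with h | h
        · subst h; omega
        · exact h
      have h4 : (2:Nat) ^ (fuel + 1) = 2 ^ fuel * 2 := pow_succ 2 fuel
      rw [ih (n / 2) ((n % 2).digitChar :: acc) hfuel (by omega)]
      conv_rhs => rw [myDigits]
      rw [if_neg (by omega : ¬ n < 2)]
      simp

theorem toDigits2_eq (m : Nat) : Nat.toDigits 2 m = myDigits m := by
  rw [Nat.toDigits]
  have hpow : m < 2 ^ (m + 1) := by
    have h1 := Nat.lt_two_pow_self (n := m)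
    have h2 : (2:Nat) ^ m ≤ 2 ^ (m + 1) := Nat.pow_le_pow_right (by omega) (by omega)
    omega
  rw [toDigitsCore_eq (m + 1) m [] (by omega) hpow]
  simp

theorem toBinChars_eq (a : Int) (h : 0 ≤ a) : PySem.Int.toBinChars a = myDigits a.toNat := by
  simp only [PySem.Int.toBinChars, if_neg (by omega : ¬ a < 0)]
  exact toDigits2_eq a.toNat

theorem toBinChars_neg (a : Int) (h : a < 0) :
    PySem.Int.toBinChars a = '-' :: myDigits a.natAbs := by
  simp only [PySem.Int.toBinChars, if_pos h]
  rw [toDigits2_eq]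

theorem bitsL_zero (w : Nat) : bitsL w 0 = List.replicate w '0' := by
  simp [bitsL, chb, Nat.zero_div, List.map_const']

theorem bitsL_snoc (w a : Nat) : bitsL (w + 1) a = bitsL w (a / 2) ++ [chb (a % 2)] := by
  simp only [bitsL, List.range_succ, List.map_append, List.map_cons, List.map_nil]
  congr 1
  · apply List.map_congr_left
    intro i hi
    simp only [List.mem_range] at hi
    have h2 : (2:Nat) * 2 ^ (w - 1 - i) = 2 ^ (w - i) := by
      rw [← pow_succ']
      congr 1
      omega
    rw [Nat.div_div_eq_div_mul, h2]
    have h3 : w + 1 - 1 - i = w - i := by omega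
    rw [h3]
  · simp

theorem myDigits_chars (n : Nat) : ∀ c ∈ myDigits n, c = '0' ∨ c = '1' := by
  induction n using Nat.strong_induction_on with
  | _ n ih =>
    intro c hc
    rw [myDigits] at hc
    by_cases h : n < 2
    · rw [if_pos h] at hc
      simp only [List.mem_singleton] at hc
      subst hc
      interval_cases n <;> simp [Nat.digitChar]
    · rw [if_neg h] at hc
      rcases List.mem_append.mp hc with h1 | h1
      · exact ih (n / 2) (Nat.div_lt_self (by omega) (by omega)) c h1
      · simp only [List.mem_singleton] at h1
        subst h1
        have h2 : n % 2 = 0 ∨ n % 2 = 1 := by omega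
        rcases h2 with h2 | h2 <;> simp [h2, Nat.digitChar]

theorem pad_myDigits : ∀ (w : Nat) (a : Nat), 0 < a → a < 2 ^ w →
    List.replicate (w - (myDigits a).length) '0' ++ myDigits a = bitsL w a := by
  intro w
  induction w with
  | zero => intro a h0 h1; omega
  | succ w ih =>
    intro a h0 h1
    by_cases h2 : a < 2
    · have ha1 : a = 1 := by omega
      subst ha1
      rw [myDigits, if_pos (by omega)]
      rw [bitsL_snoc]
      have : (1:Nat) / 2 = 0 := by norm_num
      rw [this, bitsL_zero]
      simp [chb, Nat.digitChar]
    · rw [myDigits, if_neg (by omega)]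
      have hL : (myDigits (a / 2) ++ [(a % 2).digitChar]).length = (myDigits (a / 2)).length + 1 := by
        simp
      rw [hL]
      have harr : w + 1 - ((myDigits (a / 2)).length + 1) = w - (myDigits (a / 2)).length := by omega
      rw [harr, bitsL_snoc, ← List.append_assoc]
      congr 1
      · exact ih (a / 2) (by omega) (by rw [pow_succ] at h1; omega)
      · have h2 : a % 2 = 0 ∨ a % 2 = 1 := by omega
        rcases h2 with h2 | h2 <;> simp [h2, chb, Nat.digitChar]

theorem myDigits_len_le (w a : Nat) (h0 : 0 < a) (h1 : a < 2 ^ w) :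
    (myDigits a).length ≤ w := by
  have h := congrArg List.length (pad_myDigits w a h0 h1)
  simp [bitsL] at h
  omega

theorem zfill_eq (cs : List Char) (h : ∀ c ∈ cs, c = '0' ∨ c = '1') :
    PySem.Chars.zfill cs 36 = List.replicate (36 - cs.length) '0' ++ cs := by
  rw [PySem.Chars.zfill.eq_def]
  by_cases hlen : (36:Int) ≤ cs.length
  · rw [if_pos hlen]
    have : 36 - cs.length = 0 := by omega
    rw [this]
    simp
  · rw [if_neg hlen]
    cases cs with
    | nil => simp
    | cons c rest =>
      dsimp only
      have hc := h c List.mem_cons_self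
      have hne : ¬ (c = '+' ∨ c = '-') := by
        rcases hc with h1 | h1 <;> subst h1 <;> decide
      rw [if_neg hne]
      simp

theorem fmt_eq (addr : Int) (h0 : 0 ≤ addr) (h1 : addr < 2 ^ 36) :
    PySem.Chars.zfill (PySem.Int.toBinChars addr) 36 = bitsL 36 addr.toNat := by
  rw [toBinChars_eq addr h0]
  have hch := myDigits_chars addr.toNat
  rw [zfill_eq _ hch]
  by_cases hz : addr.toNat = 0
  · rw [hz]
    rw [myDigits, if_pos (by omega)]
    rw [bitsL_zero]
    have : Nat.digitChar 0 = '0' := by decide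
    simp only [this, List.length_singleton]
    rw [show (36:Nat) - 1 = 35 from rfl, ← List.replicate_succ']
  · exact pad_myDigits 36 addr.toNat (by omega) (by omega)

theorem fmt_neg (addr : Int) (hneg : addr < 0) (hb : -2147483648 ≤ addr) :
    PySem.Chars.zfill (PySem.Int.toBinChars addr) 36
      = '-' :: (List.replicate (35 - (myDigits addr.natAbs).length) '0' ++ myDigits addr.natAbs) := by
  have h0 : 0 < addr.natAbs := by omega
  have hlt : addr.natAbs < 2 ^ 34 := by omega
  have hdl : (myDigits addr.natAbs).length ≤ 34 := myDigits_len_le 34 _ h0 hlt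
  rw [toBinChars_neg addr hneg]
  rw [PySem.Chars.zfill.eq_def]
  rw [if_neg (by simp; omega)]
  dsimp only
  rw [if_pos (Or.inr rfl)]
  have hc : ((36:Int).toNat - ('-' :: myDigits addr.natAbs).length)
      = 35 - (myDigits addr.natAbs).length := by
    simp only [List.length_cons]
    omega
  rw [hc]

theorem parseBin_aux (u : List Char) : ∀ a : Int,
    u.foldl (fun acc c => 2 * acc + (if c = '1' then 1 else 0)) a = a * 2 ^ u.length + parseBin u := by
  induction u with
  | nil => simp [parseBin]
  | cons c t ih =>
    intro a
    simp only [List.foldl_cons, List.length_cons]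
    rw [ih]
    conv_rhs => rw [parseBin]
    simp only [List.foldl_cons]
    rw [ih]
    ring

theorem parseBin_cons (c : Char) (u : List Char) :
    parseBin (c :: u) = cvb c * 2 ^ u.length + parseBin u := by
  show (c :: u).foldl (fun acc c => 2 * acc + (if c = '1' then 1 else 0)) 0 = _
  simp only [List.foldl_cons]
  rw [parseBin_aux]
  by_cases h : c = '1' <;> simp [cvb, h]

theorem enum_shift {α : Type} (xs : List α) : ∀ s : Int,
    PySem.List.enumerate xs s = (PySem.List.enumerate xs 0).map (fun p => (p.1 + s, p.2)) := by
  induction xs with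
  | nil => intro s; simp [PySem.List.enumerate_nil]
  | cons x t ih =>
    intro s
    rw [PySem.List.enumerate_cons, PySem.List.enumerate_cons]
    have h01 : (0:Int) + 1 = 1 := by norm_num
    rw [h01, ih (s + 1), ih 1]
    simp only [List.map_cons, List.map_map, zero_add]
    congr 1
    apply List.map_congr_left
    intro p _
    simp only [Function.comp]
    congr 1
    omega

theorem xpos_cons (c : Char) (t : List Char) :
    xpos (c :: t) = (if c = 'X' then [0] else []) ++ (xpos t).map (· + 1) := by
  simp only [xpos, PySem.List.enumerate_cons]
  have h01 : (0:Int) + 1 = 1 := by norm_num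
  rw [h01, enum_shift t 1]
  rw [List.filter_cons]
  by_cases hc : c = 'X' <;>
    simp [hc, List.filter_map, List.map_map, Function.comp_def]

theorem xpos_nonneg (s : List Char) : ∀ p ∈ xpos s, 0 ≤ p := by
  intro p hp
  simp only [xpos, List.mem_map] at hp
  obtain ⟨q, hq, rfl⟩ := hp
  have hq' := List.mem_of_mem_filter hq
  rw [PySem.List.mem_enumerate_iff] at hq'
  obtain ⟨k, hk, rfl⟩ := hq'
  simp

theorem xpos_len (s : List Char) : (xpos s).length = List.count 'X' s := by
  induction s with
  | nil => simp [xpos, PySem.List.enumerate_nil]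
  | cons c t ih =>
    rw [xpos_cons, List.count_cons]
    by_cases hc : c = 'X' <;> simp [hc, ih]

theorem rep_T (ps : List Int) : ∀ (reps : List Char) (j : Int) (c : Char) (m : List Char),
    (∀ p ∈ ps, 1 ≤ p) →
    (PySem.List.enumerate ps j).foldl (repStep reps) (c :: m)
      = c :: (PySem.List.enumerate (ps.map (· - 1)) j).foldl (repStep reps) m := by
  induction ps with
  | nil => intro reps j c m _; simp [PySem.List.enumerate_nil]
  | cons p t ih =>
    intro reps j c m hge
    have hp : 1 ≤ p := hge p List.mem_cons_self
    obtain ⟨k, rfl⟩ : ∃ k : Nat, p = (k : Int) + 1 := ⟨(p - 1).toNat, by omega⟩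
    simp only [List.map_cons, PySem.List.enumerate_cons, List.foldl_cons]
    have hstep : repStep reps (c :: m) (j, (k : Int) + 1)
        = c :: repStep reps m (j, (k : Int) + 1 - 1) := by
      simp only [repStep]
      rw [PySem.List.slice_to _ (by omega), PySem.List.slice_to _ (by omega),
          PySem.List.slice_from _ (by omega), PySem.List.slice_from _ (by omega)]
      have e1 : ((k : Int) + 1).toNat = k + 1 := by omega
      have e2 : ((k : Int) + 1 + 1).toNat = k + 2 := by omega
      have e3 : ((k : Int) + 1 - 1).toNat = k := by omega
      have e4 : ((k : Int) + 1 - 1 + 1).toNat = k + 1 := by omega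
      rw [e1, e2, e3, e4]
      simp [List.take_succ_cons, List.drop_succ_cons]
    rw [hstep, ih reps (j + 1) c (repStep reps m ((j, (k : Int) + 1 - 1)))
      (fun q hq => hge q (List.mem_cons_of_mem _ hq))]

theorem rep_U (ps : List Int) : ∀ (reps : List Char) (r0 : Char) (j : Int) (m : List Char), 0 ≤ j →
    (PySem.List.enumerate ps (j + 1)).foldl (repStep (r0 :: reps)) m
      = (PySem.List.enumerate ps j).foldl (repStep reps) m := by
  induction ps with
  | nil => intro reps r0 j m _; simp [PySem.List.enumerate_nil]
  | cons p t ih =>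
    intro reps r0 j m hj
    simp only [PySem.List.enumerate_cons, List.foldl_cons]
    have hget : PySem.List.pyGetD (r0 :: reps) (j + 1) ' ' = PySem.List.pyGetD reps j ' ' := by
      obtain ⟨k, rfl⟩ : ∃ k : Nat, j = (k : Int) := ⟨j.toNat, by omega⟩
      rw [PySem.List.pyGetD_natCast]
      have : ((k : Int) + 1) = ((k + 1 : Nat) : Int) := by push_cast; ring
      rw [this, PySem.List.pyGetD_natCast]
      simp
    have hstep : repStep (r0 :: reps) m (j + 1, p) = repStep reps m (j, p) := by
      simp only [repStep, hget]
    rw [hstep, ih reps r0 (j + 1) _ (by omega)]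

theorem replace_eq_fill : ∀ (s f : List Char), f.length = List.count 'X' s →
    replace_floating s (xpos s) f = fill s f := by
  intro s
  induction s with
  | nil =>
    intro f hf
    simp only [List.count_nil] at hf
    have : f = [] := List.eq_nil_of_length_eq_zero hf
    subst this
    simp [replace_floating, fill, xpos, PySem.List.enumerate_nil]
  | cons c t ih =>
    intro f hf
    have hguard : (xpos (c :: t)).length = f.length := by rw [xpos_len, hf]
    have hguardt : ∀ g : List Char, g.length = List.count 'X' t →
        (xpos t).length = g.length := by intro g hg; rw [xpos_len, hg]
    have hge1 : ∀ q ∈ (xpos t).map (· + 1), 1 ≤ q := by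
      intro q hq
      simp only [List.mem_map] at hq
      obtain ⟨r, hr, rfl⟩ := hq
      have := xpos_nonneg t r hr
      omega
    have hcancel : ((xpos t).map (· + 1)).map (· - 1) = xpos t := by
      rw [List.map_map]
      have hid : ((fun x : Int => x - 1) ∘ fun x => x + 1) = id := by
        funext x; simp
      rw [hid, List.map_id]
    by_cases hc : c = 'X'
    · subst hc
      rw [List.count_cons] at hf
      simp only [beq_self_eq_true, if_true] at hf
      cases f with
      | nil => simp at hf
      | cons r0 f' =>
        have hf' : f'.length = List.count 'X' t := by
          simp only [List.length_cons] at hf; omega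
        rw [replace_floating, if_neg (by simp [hguard])]
        rw [xpos_cons]
        simp only [reduceIte, List.singleton_append, PySem.List.enumerate_cons,
          List.foldl_cons]
        have hstep : repStep (r0 :: f') ('X' :: t) (0, 0) = r0 :: t := by
          simp only [repStep]
          rw [PySem.List.slice_to _ (by omega), PySem.List.slice_from _ (by omega)]
          simp [PySem.List.pyGetD_zero_cons]
        rw [hstep]
        rw [show (0:Int) + 1 = 0 + 1 from rfl, rep_U ((xpos t).map (· + 1)) f' r0 0 _ le_rfl]
        rw [rep_T ((xpos t).map (· + 1)) f' 0 r0 t hge1, hcancel]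
        have ht := ih f' hf'
        rw [replace_floating, if_neg (by rw [xpos_len, hf']; simp)] at ht
        rw [ht]
        conv_rhs => rw [fill]
        simp
    · rw [List.count_cons] at hf
      simp only [hc, beq_iff_eq, if_false, Nat.add_zero] at hf
      rw [replace_floating, if_neg (by simp [hguard])]
      rw [xpos_cons, if_neg hc, List.nil_append]
      rw [rep_T ((xpos t).map (· + 1)) f 0 c t hge1, hcancel]
      have ht := ih f (by omega)
      rw [replace_floating, if_neg (by rw [xpos_len]; omega)] at ht
      rw [ht]
      simp [fill, hc]

theorem fill_length : ∀ (s f : List Char), (fill s f).length = s.length := by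
  intro s
  induction s with
  | nil => intro f; simp [fill]
  | cons c t ih =>
    intro f
    by_cases hc : c = 'X'
    · cases f with
      | nil => simp [fill, hc, ih]
      | cons r rf => simp [fill, hc, ih]
    · simp [fill, hc, ih]

theorem prod_len (n : Nat) : ∀ f ∈ pyProduct10 n, f.length = n := by
  induction n with
  | zero => intro f hf; simp [pyProduct10] at hf; simp [hf]
  | succ n ih =>
    intro f hf
    simp only [pyProduct10, List.flatMap_cons, List.flatMap_nil, List.append_nil,
      List.mem_append, List.mem_map] at hf
    rcases hf with ⟨g, hg, rfl⟩ | ⟨g, hg, rfl⟩ <;> simp [ih g hg]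

theorem mainA (s : List Char) :
    (pyProduct10 (List.count 'X' s)).map (fun f => parseBin (fill s f)) = core s := by
  induction s with
  | nil => simp [pyProduct10, fill, core, parseBin]
  | cons c t ih =>
    by_cases hc : c = 'X'
    · subst hc
      rw [List.count_cons]
      simp only [beq_self_eq_true, if_true]
      simp only [pyProduct10, List.flatMap_cons, List.flatMap_nil, List.append_nil,
        List.map_append, List.map_map]
      rw [core]
      simp only [reduceIte]
      congr 1
      · rw [← ih, List.map_map]
        apply List.map_congr_left
        intro f _
        have h1 : fill ('X' :: t) ('1' :: f) = '1' :: fill t f := by simp [fill]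
        simp [Function.comp, h1, parseBin_cons, fill_length, cvb]
    · rw [List.count_cons]
      simp only [hc, beq_iff_eq, if_false, Nat.add_zero]
      rw [core, if_neg hc, ← ih, List.map_map]
      apply List.map_congr_left
      intro f _
      have h1 : fill (c :: t) f = c :: fill t f := by simp [fill, hc]
      simp [Function.comp, h1, parseBin_cons, fill_length]

theorem combineMask_length (cs bs : List Char) :
    (combineMask cs bs).length = min cs.length bs.length := by
  simp [combineMask]

theorem scanB (cs bs : List Char) (hlen : bs.length = 36)
    (hch : ∀ (j : Nat) (h1 : j < cs.length) (h2 : j < bs.length),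
      ¬(cs[j] = '1' ∨ cs[j] = 'X') → bs[j] = '0' ∨ bs[j] = '1') :
    ∀ (k j : Nat), j + k = min cs.length 36 → ∀ (b0 : Int) (F0 : List Nat),
    (PySem.List.enumerate ((cs.take (min cs.length 36)).drop j) (j : Int)).foldl
        (altStep (min cs.length 36) bs) (b0, F0)
      = (b0 + coreBase ((combineMask cs bs).drop j), F0 ++ coreFloat ((combineMask cs bs).drop j)) := by
  intro k
  induction k with
  | zero =>
    intro j hj b0 F0
    have hlen1 : ((cs.take (min cs.length 36)).drop j) = [] := by
      apply List.drop_eq_nil_of_le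
      simp only [List.length_take]
      omega
    have hlen2 : ((combineMask cs bs).drop j) = [] := by
      apply List.drop_eq_nil_of_le
      rw [combineMask_length, hlen]
      omega
    rw [hlen1, hlen2]
    simp [PySem.List.enumerate_nil, coreBase, coreFloat]
  | succ k ih =>
    intro j hj b0 F0
    have hjn : j < min cs.length 36 := by omega
    have hjc : j < cs.length := by omega
    have hjb : j < bs.length := by omega
    have hjt : j < (cs.take (min cs.length 36)).length := by
      simp only [List.length_take]
      omega
    have hdrop : (cs.take (min cs.length 36)).drop j
        = cs[j] :: (cs.take (min cs.length 36)).drop (j + 1) := by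
      rw [List.drop_eq_getElem_cons hjt, List.getElem_take]
    have hjs : j < (combineMask cs bs).length := by rw [combineMask_length, hlen]; omega
    have hsdrop : (combineMask cs bs).drop j
        = (combineMask cs bs)[j] :: (combineMask cs bs).drop (j + 1) :=
      List.drop_eq_getElem_cons hjs
    have hlenR : ((combineMask cs bs).drop (j + 1)).length = min cs.length 36 - 1 - j := by
      rw [List.length_drop, combineMask_length, hlen]
      omega
    have hsel : (combineMask cs bs)[j]
        = (if cs[j] = '1' ∨ cs[j] = 'X' then cs[j] else bs[j]) := by
      simp only [combineMask, List.getElem_map, List.getElem_zip]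
    have hih := ih (j + 1) (by omega)
    have hcast : ((j:Int) + 1) = ((j + 1 : Nat) : Int) := by push_cast; ring
    rw [hdrop, PySem.List.enumerate_cons, List.foldl_cons, hcast]
    rw [hsdrop]
    by_cases h1 : cs[j] = '1'
    · have hstep : altStep (min cs.length 36) bs (b0, F0) ((j : Int), cs[j])
          = (b0 + 2 ^ (min cs.length 36 - 1 - j), F0) := by
        simp [altStep, h1]
      rw [hstep, hih]
      have hsel1 : (combineMask cs bs)[j] = '1' := by rw [hsel]; simp [h1]
      rw [hsel1]
      simp only [coreBase, coreFloat, hlenR, Prod.mk.injEq]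
      constructor
      · simp [cvb]
        ring
      · simp
    · by_cases hx : cs[j] = 'X'
      · have hstep : altStep (min cs.length 36) bs (b0, F0) ((j : Int), cs[j])
            = (b0, F0 ++ [min cs.length 36 - 1 - j]) := by
          simp [altStep, hx]
        rw [hstep, hih]
        have hselx : (combineMask cs bs)[j] = 'X' := by rw [hsel]; simp [hx]
        rw [hselx]
        simp only [coreBase, coreFloat, hlenR, Prod.mk.injEq]
        constructor
        · simp
        · simp
      · have hbit := hch j hjc hjb (by tauto)
        have hv : (PySem.Int.ofChars? [bs[j]?.getD ' ']).getD 0 = cvb bs[j] := by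
          rw [List.getElem?_eq_getElem hjb]
          rcases hbit with h | h <;> rw [h] <;> decide
        have hstep : altStep (min cs.length 36) bs (b0, F0) ((j : Int), cs[j])
            = (b0 + cvb bs[j] * 2 ^ (min cs.length 36 - 1 - j), F0) := by
          simp [altStep, h1, hx, hv]
        rw [hstep, hih]
        have hselb : (combineMask cs bs)[j] = bs[j] := by
          rw [hsel]
          simp [h1, hx]
        rw [hselb]
        have hnX : ¬ (bs[j] = 'X') := by
          rcases hbit with h | h <;> rw [h] <;> decide
        simp only [coreBase, coreFloat, hlenR, Prod.mk.injEq, if_neg hnX]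
        constructor
        · ring
        · simp

theorem expand_append (qs : List Nat) : ∀ (l1 l2 : List Int),
    qs.foldl expandStep (l1 ++ l2) = qs.foldl expandStep l1 ++ qs.foldl expandStep l2 := by
  induction qs with
  | nil => simp
  | cons q t ih =>
    intro l1 l2
    simp only [List.foldl_cons]
    rw [← ih]
    congr 1
    simp [expandStep, List.flatMap_append]

theorem expand_map_add (qs : List Nat) : ∀ (l : List Int) (b : Int),
    qs.foldl expandStep (l.map (fun v => b + v)) = (qs.foldl expandStep l).map (fun v => b + v) := by
  induction qs with
  | nil => simp
  | cons q t ih =>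
    intro l b
    simp only [List.foldl_cons]
    rw [← ih]
    congr 1
    simp only [expandStep, List.flatMap_map]
    rw [List.map_flatMap]
    apply List.flatMap_congr
    intro v _
    simp [add_assoc]

theorem mainB (s : List Char) : (coreFloat s).foldl expandStep [coreBase s] = core s := by
  induction s with
  | nil => simp [core, coreBase, coreFloat]
  | cons c t ih =>
    by_cases hc : c = 'X'
    · subst hc
      simp only [core, coreBase, coreFloat, reduceIte, List.singleton_append,
        List.foldl_cons, zero_add]
      have h1 : expandStep [coreBase t] t.length
          = [coreBase t + 2 ^ t.length] ++ [coreBase t] := by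
        simp [expandStep]
      rw [h1, expand_append]
      have h2 : [coreBase t + 2 ^ t.length]
          = [coreBase t].map (fun v => (2:Int) ^ t.length + v) := by
        simp [add_comm]
      rw [h2, expand_map_add, ih]
    · simp only [core, coreBase, coreFloat, if_neg hc, List.nil_append]
      have h2 : [cvb c * 2 ^ t.length + coreBase t]
          = [coreBase t].map (fun v => cvb c * (2:Int) ^ t.length + v) := by
        simp
      rw [h2, expand_map_add, ih]

theorem bits_facts (mask : String) (addr : Int)
    (hlb : -2147483648 ≤ addr) (hub : addr ≤ 2147483648)
    (hpre : mask ≠ "" ∧ (0 ≤ addr ∨ mask.toList.head? = some '1' ∨ mask.toList.head? = some 'X')) :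
    (PySem.Chars.zfill (PySem.Int.toBinChars addr) 36).length = 36 ∧
    (∀ (j : Nat) (h1 : j < mask.toList.length)
        (h2 : j < (PySem.Chars.zfill (PySem.Int.toBinChars addr) 36).length),
      ¬(mask.toList[j] = '1' ∨ mask.toList[j] = 'X') →
      (PySem.Chars.zfill (PySem.Int.toBinChars addr) 36)[j] = '0' ∨
      (PySem.Chars.zfill (PySem.Int.toBinChars addr) 36)[j] = '1') := by
  by_cases hneg : addr < 0
  · have hfe := fmt_neg addr hneg hlb
    have h0 : 0 < addr.natAbs := by omega
    have hdl : (myDigits addr.natAbs).length ≤ 34 :=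
      myDigits_len_le 34 _ h0 (by omega)
    constructor
    · rw [hfe]
      simp
      omega
    · intro j h1 h2 hnot
      cases j with
      | zero =>
        rcases hpre.2 with h | h | h
        · omega
        all_goals {
          exfalso
          apply hnot
          have hh : mask.toList.head? = some mask.toList[0] := by
            rw [List.head?_eq_getElem?, List.getElem?_eq_getElem h1]
          rw [hh] at h
          injection h with h
          simp [h]
        }
      | succ k =>
        have hk2 : k < (List.replicate (35 - (myDigits addr.natAbs).length) '0'
            ++ myDigits addr.natAbs).length := by
          rw [hfe] at h2
          simpa using Nat.lt_of_succ_lt_succ (by simpa using h2)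
        have he : (PySem.Chars.zfill (PySem.Int.toBinChars addr) 36)[k + 1]'h2
            = (List.replicate (35 - (myDigits addr.natAbs).length) '0'
                ++ myDigits addr.natAbs)[k]'hk2 := by
          rw [List.getElem_of_eq hfe]
          simp
        rw [he]
        have hmem := List.getElem_mem hk2
        rcases List.mem_append.mp hmem with hm | hm
        · left; exact List.eq_of_mem_replicate hm
        · exact myDigits_chars addr.natAbs _ hm
  · have h36 : addr < 2 ^ 36 := by omega
    have hfe := fmt_eq addr (by omega) h36
    constructor
    · rw [hfe]; simp [bitsL]
    · intro j h1 h2 hnot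
      have hmem : (PySem.Chars.zfill (PySem.Int.toBinChars addr) 36)[j] ∈ bitsL 36 addr.toNat := by
        rw [← hfe]
        exact List.getElem_mem h2
      simp only [bitsL, List.mem_map] at hmem
      obtain ⟨i, _, hi⟩ := hmem
      rw [← hi]
      unfold chb
      split
      · right; rfl
      · left; rfl

-- ===== VERDICT (by name: the statement is the Claim_ definition above) =====
theorem addr_decoder_spec : Claim_equal_addr_decoder := by
  unfold Claim_equal_addr_decoder
  intro mask addr value hdom hpre
  unfold Spec_addr_decoder
  have hbounds : -2147483648 ≤ addr ∧ addr ≤ 2147483648 := by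
    unfold Dom_addr_decoder pvDomInt at hdom
    simp only [Bool.and_eq_true, decide_eq_true_eq] at hdom
    exact hdom.1.2
  obtain ⟨hlen, hch⟩ := bits_facts mask addr hbounds.1 hbounds.2 hpre
  unfold addr_decoder addr_decoder_alt
  dsimp only
  rw [PySem.List.foldl_append_singleton_eq_map, List.nil_append]
  rw [show (mask.toList.zip (PySem.Chars.zfill (PySem.Int.toBinChars addr) 36)).map
        (fun mi => if mi.1 = '1' ∨ mi.1 = 'X' then mi.1 else mi.2)
      = combineMask mask.toList (PySem.Chars.zfill (PySem.Int.toBinChars addr) 36) from rfl]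
  rw [PySem.List.count_eq]
  -- A side: switch replace_floating to fill, then to core
  rw [PySem.List.foldl_congr_mem
    (pyProduct10 (List.count 'X' (combineMask mask.toList (PySem.Chars.zfill (PySem.Int.toBinChars addr) 36))))
    _ (fun d f => d.insert (parseBin (fill (combineMask mask.toList (PySem.Chars.zfill (PySem.Int.toBinChars addr) 36)) f)) value) _
    (by
      intro d f hf
      have hflen : f.length = List.count 'X' (combineMask mask.toList (PySem.Chars.zfill (PySem.Int.toBinChars addr) 36)) :=
        prod_len _ f hf
      rw [show ((PySem.List.enumerate (combineMask mask.toList (PySem.Chars.zfill (PySem.Int.toBinChars addr) 36))).filter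
            (fun p => p.2 = 'X')).map (·.1) = xpos (combineMask mask.toList (PySem.Chars.zfill (PySem.Int.toBinChars addr) 36)) from rfl]
      rw [replace_eq_fill _ f hflen])]
  rw [← List.foldl_map (f := fun f => parseBin (fill (combineMask mask.toList (PySem.Chars.zfill (PySem.Int.toBinChars addr) 36)) f))
    (g := fun (d : PySem.Dict Int Int) a => d.insert a value)]
  rw [mainA]
  -- B side
  rw [PySem.List.slice_to_natCast]
  have hscan := scanB mask.toList (PySem.Chars.zfill (PySem.Int.toBinChars addr) 36) hlen hch
    (min mask.toList.length 36) 0 (by omega) 0 []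
  rw [List.drop_zero] at hscan
  rw [show ((0:Nat) : Int) = (0 : Int) from rfl] at hscan
  rw [hscan, List.drop_zero, zero_add, List.nil_append, mainB]
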